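-- pv_equiv track=rewrite | github.com/JakubZaton/SPD1 | schrage_bezkolejki.py | loss_function
-- ===== SOURCE A (Python) =====
-- def loss_function(data):
--     max_time_q = sum(data[0])  # bieżący czas dostarczenia zadania
--     time = data[0][0] + data[0][1]
--     C = []
--     C.append(time)
--     for t in range(1, len(data)):
--         if time > data[t][0]:
--             time = time + data[t][1]
--         else:
--             time = data[t][0] + data[t][1]
--
--         time_q = data[t][2] + time
--         max_time_q = max(max_time_q, time_q)
--         C.append(max_time_q)
--     return C
-- ===== SOURCE B (Python) =====
-- def loss_function(data):
--     if not data: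
--         return []
--     # pass 1: completion times via the recurrence t = (t if t > r else r) + p
--     t = data[0][0] + data[0][1]
--     times = [t]
--     for row in data[1:]:
--         t = (t if t > row[0] else row[0]) + row[1]
--         times.append(t)
--     # pass 2: running prefix max of q + completion, seeded with sum(data[0])
--     acc = sum(data[0])
--     C = [times[0]]
--     for ti, row in zip(times[1:], data[1:]):
--         acc = max(acc, row[2] + ti)
--         C.append(acc)
--     return C
-- ===== Notes on version B (the rewrite author's own statement) =====
-- stated objective: alternative
-- what changed: B splits A's single fused loop into two passes: first a list of completion times via the start/processing recurrence, then a running prefix-max over q+completion seeded with sum(data[0]); same values, different decomposition.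
-- outside the precondition, e.g. on loss_function([]): A raises IndexError, B returns []
-- crash fix: On empty data A raises IndexError (data[0]); B returns []. — e.g. on loss_function([]): A raises IndexError, B returns []
import Mathlib
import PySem

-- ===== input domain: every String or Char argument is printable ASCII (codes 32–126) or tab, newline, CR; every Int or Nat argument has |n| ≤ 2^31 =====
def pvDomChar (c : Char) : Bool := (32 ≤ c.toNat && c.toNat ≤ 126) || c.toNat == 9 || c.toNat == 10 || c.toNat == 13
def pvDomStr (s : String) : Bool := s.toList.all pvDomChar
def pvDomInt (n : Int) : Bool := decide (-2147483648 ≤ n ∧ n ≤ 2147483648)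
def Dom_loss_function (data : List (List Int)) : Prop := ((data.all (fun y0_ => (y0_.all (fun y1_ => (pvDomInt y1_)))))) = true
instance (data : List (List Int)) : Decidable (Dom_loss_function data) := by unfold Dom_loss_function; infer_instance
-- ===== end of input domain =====

-- B's change: A's single fused loop is split into two passes (completion times, then a running prefix-max
-- over q+completion seeded with sum(data[0])); same values, different decomposition (no speed claim).

-- ===== PORT A =====
-- A's single loop: state (time, max_time_q), C grown by append; pyGetD is exact under Pre_ (indices in range)
def lossA_loop (rows : List (List Int)) (time max_time_q : Int) (C : List Int) : List Int :=
  match rows with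
  | [] => C
  | row :: rest =>
      let time' := if time > PySem.List.pyGetD row 0 0
                   then time + PySem.List.pyGetD row 1 0
                   else PySem.List.pyGetD row 0 0 + PySem.List.pyGetD row 1 0
      let time_q := PySem.List.pyGetD row 2 0 + time'
      let m' := max max_time_q time_q
      lossA_loop rest time' m' (C ++ [m'])

def loss_function (data : List (List Int)) : List Int :=
  match data with
  | [] => []  -- A raises IndexError here; excluded by Pre_loss_function
  | first :: rest =>
      let max_time_q := first.sum
      let time := PySem.List.pyGetD first 0 0 + PySem.List.pyGetD first 1 0
      lossA_loop rest time max_time_q [time]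

-- ===== PORT B =====
-- pass 1: completion times via t = (t if t > r else r) + p
def lossB_times (t : Int) (rows : List (List Int)) : List Int :=
  match rows with
  | [] => []
  | row :: rest =>
      let t' := (if t > PySem.List.pyGetD row 0 0 then t else PySem.List.pyGetD row 0 0)
                + PySem.List.pyGetD row 1 0
      t' :: lossB_times t' rest

-- pass 2: running prefix max of q + completion
def lossB_prefix (acc : Int) (pairs : List (Int × List Int)) : List Int :=
  match pairs with
  | [] => []
  | (ti, row) :: rest =>
      let acc' := max acc (PySem.List.pyGetD row 2 0 + ti)
      acc' :: lossB_prefix acc' rest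

def loss_function_alt (data : List (List Int)) : List Int :=
  match data with
  | [] => []
  | first :: rest =>
      let t0 := PySem.List.pyGetD first 0 0 + PySem.List.pyGetD first 1 0
      let times := lossB_times t0 rest
      t0 :: lossB_prefix first.sum (times.zip rest)

-- ===== PRECONDITION & SPEC =====
-- Pre_ excludes exactly the inputs where A raises IndexError: empty data, a first row with
-- fewer than 2 entries, or a later row with fewer than 3 entries.
def Pre_loss_function (data : List (List Int)) : Prop :=
  data ≠ [] ∧ 2 ≤ (data.headD []).length ∧ ∀ row ∈ data.tail, 3 ≤ row.length
instance (data : List (List Int)) : Decidable (Pre_loss_function data) := by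
  unfold Pre_loss_function; infer_instance
def pvWitness_loss_function : List (List Int) := [[1, 2, 3], [0, 5, 1], [10, 1, 2]]

-- On empty data A raises IndexError (data[0]); B returns [] (theorem loss_function_raises, bottom).
def Raises_loss_function (data : List (List Int)) : Prop := data = []
instance (data : List (List Int)) : Decidable (Raises_loss_function data) := by
  unfold Raises_loss_function; infer_instance
def pvRaiseWitness_loss_function : List (List Int) := []
def pvRaiseWitnessOut_loss_function : List Int := []

def Spec_loss_function (data : List (List Int)) (out : List Int) : Prop := out = loss_function_alt data
instance (data : List (List Int)) (out : List Int) : Decidable (Spec_loss_function data out) := by unfold Spec_loss_function; infer_instance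

-- ===== CLAIM (what is proved, stated in full; the proofs are below) =====
def Claim_equal_loss_function : Prop := ∀ (data : List (List Int)), Dom_loss_function data → Pre_loss_function data → Spec_loss_function data (loss_function data)
def Claim_raises_loss_function : Prop := (∀ (data : List (List Int)), Dom_loss_function data → Raises_loss_function data → ¬ Pre_loss_function data) ∧ (Dom_loss_function (pvRaiseWitness_loss_function) ∧ Raises_loss_function (pvRaiseWitness_loss_function) ∧ loss_function_alt (pvRaiseWitness_loss_function) = pvRaiseWitnessOut_loss_function)

-- ===== LEMMAS AND PROOFS =====
-- A's loop with accumulator C equals C ++ (the cons-built output of B's two passes)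
lemma lossA_loop_eq (rows : List (List Int)) :
    ∀ (time m : Int) (C : List Int),
      lossA_loop rows time m C = C ++ lossB_prefix m ((lossB_times time rows).zip rows) := by
  induction rows with
  | nil => intro time m C; simp [lossA_loop, lossB_times, lossB_prefix]
  | cons row rest ih =>
      intro time m C
      have hstep :
          (if time > PySem.List.pyGetD row 0 0
           then time + PySem.List.pyGetD row 1 0
           else PySem.List.pyGetD row 0 0 + PySem.List.pyGetD row 1 0)
          = (if time > PySem.List.pyGetD row 0 0 then time else PySem.List.pyGetD row 0 0)
            + PySem.List.pyGetD row 1 0 := by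
        split_ifs <;> rfl
      simp only [lossA_loop, lossB_times, lossB_prefix, List.zip, List.zipWith, hstep]
      rw [ih]
      simp [List.zip]

-- ===== VERDICT (by name: the statement is the Claim_ definition above) =====
theorem loss_function_spec : Claim_equal_loss_function := by
  intro data _ _
  unfold Spec_loss_function
  cases data with
  | nil => rfl
  | cons first rest =>
      simp only [loss_function, loss_function_alt]
      rw [lossA_loop_eq]
      simp

@[simp] theorem loss_function_raises : Claim_raises_loss_function := by
  unfold Claim_raises_loss_function
  refine ⟨?_, by decide⟩
  intro data _ hr hp
  exact hp.1 hr
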